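-- pv_equiv track=rewrite | github.com/LeanderKafemann/ccs-pycalendar | src/pycalendar/utils.py | encodeParameterValue
-- ===== SOURCE A (Python) =====
-- from typing import Any, List, Tuple, IO, Sequence, Union
--
-- def encodeParameterValue(value: str) -> str:
--     encode = False
--     for c in "\r\n\"^":
--         if c in value:
--             encode = True
--     if encode:
--         encoded: List[str] = []
--         last = ''
--         for c in value:
--             if c in "\r\n\"^":
--                 if c == '\r':
--                     encoded.append("^n")
--                 elif c == '\n':
--                     if last != '\r':
--                         encoded.append("^n")
--                 elif c == '"':
--                     encoded.append("^'")
--                 elif c == '^':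
--                     encoded.append("^^")
--             else:
--                 encoded.append(c)
--             last = c
--         return "".join(encoded)
--     else:
--         return value
-- ===== SOURCE B (Python) =====
-- def encodeParameterValue(value: str) -> str:
--     value = value.replace("^", "^^")
--     value = value.replace("\r\n", "\n")
--     value = value.replace("\r", "^n")
--     value = value.replace("\n", "^n")
--     return value.replace('"', "^'")
-- ===== Notes on version B (the rewrite author's own statement) =====
-- stated objective: alternative
-- what changed: Replaced A's character-by-character loop with stateful last-char tracking by five whole-string staged replace passes: escape the caret character first, collapse CRLF to LF, then rewrite carriage return, line feed and double quote to their caret escapes.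
import Mathlib
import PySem

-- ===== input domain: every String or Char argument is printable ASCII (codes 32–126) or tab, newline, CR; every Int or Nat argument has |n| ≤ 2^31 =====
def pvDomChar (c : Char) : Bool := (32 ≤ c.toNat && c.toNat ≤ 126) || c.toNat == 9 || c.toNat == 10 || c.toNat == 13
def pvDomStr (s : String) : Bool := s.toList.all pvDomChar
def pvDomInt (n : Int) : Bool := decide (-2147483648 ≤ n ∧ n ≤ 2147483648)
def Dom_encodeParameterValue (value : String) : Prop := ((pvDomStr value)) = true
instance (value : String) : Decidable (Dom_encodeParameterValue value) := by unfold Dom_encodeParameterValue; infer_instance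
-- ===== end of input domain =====

-- B replaces A's stateful char-by-char loop by five staged whole-string replace passes
-- (caret escaped first, CRLF collapsed to LF, then CR/LF/quote rewritten); objective: alternative.

-- ===== PORT A =====
-- the for-loop over `value`, carrying (encoded, last); Python's initial last = '' is the `none` case
def pvEncALoop : List Char → List String → Option Char → List String
  | [], encoded, _ => encoded
  | c :: rest, encoded, last =>
    let encoded :=
      if c == '\r' || c == '\n' || c == '"' || c == '^' then
        if c == '\r' then encoded ++ ["^n"]
        else if c == '\n' then (if last ≠ some '\r' then encoded ++ ["^n"] else encoded)
        else if c == '"' then encoded ++ ["^'"]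
        else encoded ++ ["^^"]
      else encoded ++ [c.toString]
    pvEncALoop rest encoded (some c)

def encodeParameterValue (value : String) : String :=
  -- for c in "\r\n\"^": if c in value: encode = True
  let encode := (['\r', '\n', '"', '^'].foldl
    (fun e c => if value.toList.contains c then true else e) false)
  if encode then
    PySem.Str.join "" (pvEncALoop value.toList [] none)
  else
    value

-- ===== PORT B =====
-- Source B: five staged str.replace passes over the whole string
def encodeParameterValue_alt (value : String) : String :=
  PySem.Str.replace
    (PySem.Str.replace
      (PySem.Str.replace
        (PySem.Str.replace
          (PySem.Str.replace value "^" "^^")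
          "\r\n" "\n")
        "\r" "^n")
      "\n" "^n")
    "\"" "^'"

-- ===== PRECONDITION & SPEC =====
def Spec_encodeParameterValue (value : String) (out : String) : Prop := out = encodeParameterValue_alt value
instance (value : String) (out : String) : Decidable (Spec_encodeParameterValue value out) := by unfold Spec_encodeParameterValue; infer_instance

-- ===== CLAIM (what is proved, stated in full; the proofs are below) =====
def Claim_equal_encodeParameterValue : Prop := ∀ (value : String), Dom_encodeParameterValue value → Spec_encodeParameterValue value (encodeParameterValue value)

-- ===== LEMMAS AND PROOFS =====

-- fuel-free characterisation of Chars.replace for a nonempty pattern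
def pvRep (old new : List Char) : List Char → List Char
  | [] => []
  | c :: t =>
    if old.isPrefixOf (c :: t) then new ++ pvRep old new (List.drop (old.length - 1) t)
    else c :: pvRep old new t
termination_by l => l.length
decreasing_by
  · simpa using Nat.lt_succ_of_le (List.length_drop_le _ _)
  · simp

theorem pvRep_nil (old new : List Char) : pvRep old new [] = [] := by
  rw [pvRep.eq_def]

theorem pvRep_cons (old new : List Char) (c : Char) (t : List Char) :
    pvRep old new (c :: t) =
      if old.isPrefixOf (c :: t) then new ++ pvRep old new (List.drop (old.length - 1) t)
      else c :: pvRep old new t := by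
  rw [pvRep.eq_def]

theorem pvReplaceGo_eq (old new : List Char) (hold : old ≠ []) :
    ∀ (fuel : Nat) (l acc : List Char), l.length ≤ fuel →
      PySem.Chars.replace.go old new fuel l acc = acc.reverse ++ pvRep old new l := by
  intro fuel
  induction fuel with
  | zero =>
    intro l acc hl
    have : l = [] := List.eq_nil_of_length_eq_zero (Nat.le_zero.mp hl)
    subst this
    simp [PySem.Chars.replace.go, pvRep_nil]
  | succ n ih =>
    intro l acc hl
    cases l with
    | nil => simp [PySem.Chars.replace.go, pvRep_nil]
    | cons c t =>
      rw [PySem.Chars.replace.go, pvRep_cons]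
      by_cases hp : old.isPrefixOf (c :: t)
      · rw [if_pos hp, if_pos hp]
        have hlen : (List.drop old.length (c :: t)).length ≤ n := by
          cases old with
          | nil => exact absurd rfl hold
          | cons o os =>
            simp only [List.length_drop, List.length_cons] at hl ⊢
            omega
        rw [ih _ _ hlen]
        have hdrop : List.drop old.length (c :: t) = List.drop (old.length - 1) t := by
          cases old with
          | nil => exact absurd rfl hold
          | cons o os => simp
        simp [hdrop]
      · rw [if_neg hp, if_neg hp, ih t (c :: acc) (by simpa using Nat.lt_succ_iff.mp (by simpa using hl))]
        simp

theorem pvReplace_eq (old new l : List Char) (hold : old ≠ []) :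
    PySem.Chars.replace l old new = pvRep old new l := by
  unfold PySem.Chars.replace
  rw [if_neg (by simpa using hold), pvReplaceGo_eq old new hold _ _ _ (le_refl _)]
  simp

-- single-character pattern: pointwise substitution
theorem pvRep_single (p : Char) (new : List Char) (c : Char) (t : List Char) :
    pvRep [p] new (c :: t) = if c = p then new ++ pvRep [p] new t else c :: pvRep [p] new t := by
  rw [pvRep_cons]
  by_cases h : c = p
  · subst h; simp [List.isPrefixOf]
  · have h' : ¬ p = c := fun hh => h hh.symm
    simp [List.isPrefixOf, h, h']

-- two-character pattern "\r\n"
theorem pvRep_crlf_cons (new : List Char) (c : Char) (t : List Char) :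
    pvRep ['\r', '\n'] new (c :: t) =
      if c = '\r' ∧ t.head? = some '\n' then new ++ pvRep ['\r', '\n'] new t.tail
      else c :: pvRep ['\r', '\n'] new t := by
  rw [pvRep_cons]
  by_cases hc : c = '\r'
  · subst hc
    cases t with
    | nil => simp [List.isPrefixOf]
    | cons d t' =>
      by_cases hd : d = '\n'
      · subst hd; simp [List.isPrefixOf]
      · have h' : ¬ '\n' = d := fun hh => hd hh.symm
        simp [List.isPrefixOf, hd, h']
  · have h' : ¬ '\r' = c := fun hh => hc hh.symm
    simp [List.isPrefixOf, hc, h']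

-- the combined effect all five passes must equal: A's encoding, char-level
def pvGEnc : List Char → List Char
  | [] => []
  | '\r' :: '\n' :: t => '^' :: 'n' :: pvGEnc t
  | '\r' :: t => '^' :: 'n' :: pvGEnc t
  | '\n' :: t => '^' :: 'n' :: pvGEnc t
  | '"' :: t => '^' :: '\'' :: pvGEnc t
  | '^' :: t => '^' :: '^' :: pvGEnc t
  | c :: t => c :: pvGEnc t

theorem pvGEnc_nil : pvGEnc [] = [] := by rw [pvGEnc.eq_def]
theorem pvGEnc_cr_nil : pvGEnc ['\r'] = ['^', 'n'] := rfl
theorem pvGEnc_cr_lf (t : List Char) : pvGEnc ('\r' :: '\n' :: t) = '^' :: 'n' :: pvGEnc t := rfl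
theorem pvGEnc_cr (d : Char) (t : List Char) (hd : d ≠ '\n') :
    pvGEnc ('\r' :: d :: t) = '^' :: 'n' :: pvGEnc (d :: t) := by
  rw [pvGEnc.eq_def]; simp [hd]
theorem pvGEnc_lf (t : List Char) : pvGEnc ('\n' :: t) = '^' :: 'n' :: pvGEnc t := rfl
theorem pvGEnc_quote (t : List Char) : pvGEnc ('"' :: t) = '^' :: '\'' :: pvGEnc t := rfl
theorem pvGEnc_caret (t : List Char) : pvGEnc ('^' :: t) = '^' :: '^' :: pvGEnc t := rfl
theorem pvGEnc_other (c : Char) (t : List Char)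
    (h1 : c ≠ '\r') (h2 : c ≠ '\n') (h3 : c ≠ '"') (h4 : c ≠ '^') :
    pvGEnc (c :: t) = c :: pvGEnc t := by
  rw [pvGEnc.eq_def]; simp [h1, h2, h3, h4]

-- abbreviation for B's char-level pipeline
def pvChain (l : List Char) : List Char :=
  pvRep ['"'] ['^', '\'']
    (pvRep ['\n'] ['^', 'n']
      (pvRep ['\r'] ['^', 'n']
        (pvRep ['\r', '\n'] ['\n']
          (pvRep ['^'] ['^', '^'] l))))

-- B's five passes compute pvGEnc
theorem pvChain_eq_gEnc (l : List Char) : pvChain l = pvGEnc l := by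
  induction hn : l.length using Nat.strong_induction_on generalizing l with
  | _ n ih =>
  subst hn
  have IH : ∀ (t : List Char), t.length < l.length → pvChain t = pvGEnc t :=
    fun t h => ih t.length h t rfl
  cases l with
  | nil => simp [pvChain, pvRep_nil, pvGEnc_nil]
  | cons c t =>
    by_cases hr : c = '\r'
    · subst hr
      cases t with
      | nil =>
        unfold pvChain
        simp [pvRep_single, pvRep_crlf_cons, pvRep_nil, pvGEnc_cr_nil]
      | cons d t' =>
        by_cases hd : d = '\n'
        · subst hd
          have hIH := IH t' (by simp)
          unfold pvChain at hIH ⊢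
          simp [pvRep_single, pvRep_crlf_cons, pvGEnc_cr_lf, hIH]
        · have hIH := IH (d :: t') (by simp)
          unfold pvChain at hIH ⊢
          simp only [pvRep_single] at hIH ⊢
          simp only [List.cons_append, List.nil_append] at hIH ⊢
          have hhead2 : ¬ ((if d = '^' then '^' :: '^' :: pvRep ['^'] ['^', '^'] t'
              else d :: pvRep ['^'] ['^', '^'] t').head? = some '\n') := by
            split_ifs with h
            · simp
            · simp [hd]
          simp [pvRep_single, pvRep_crlf_cons, hhead2, pvGEnc_cr d t' hd, hIH]
    · have hIH := IH t (by simp)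
      unfold pvChain at hIH ⊢
      by_cases hn' : c = '\n'
      · subst hn'
        simp [pvRep_single, pvRep_crlf_cons, pvGEnc_lf, hIH]
      · by_cases hq : c = '"'
        · subst hq
          simp [pvRep_single, pvRep_crlf_cons, pvGEnc_quote, hIH]
        · by_cases hcar : c = '^'
          · subst hcar
            simp [pvRep_single, pvRep_crlf_cons, pvGEnc_caret, hIH]
          · simp [pvRep_single, pvRep_crlf_cons, hr, hn', hq, hcar,
              pvGEnc_other c t hr hn' hq hcar, hIH]

-- A's loop equals pvGEnc up to the accumulator and `last`: `last` matters only when the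
-- next char is '\n' and last was '\r'.
theorem pvJoinNilCons (p : List Char) (ps : List (List Char)) :
    PySem.Chars.join [] (p :: ps) = p ++ PySem.Chars.join [] ps := by
  cases ps with
  | nil => simp [PySem.Chars.join_singleton, PySem.Chars.join_nil]
  | cons q qs => simp [PySem.Chars.join_cons_cons]

theorem pvJoinNilAppend (xs ys : List (List Char)) :
    PySem.Chars.join [] (xs ++ ys) = PySem.Chars.join [] xs ++ PySem.Chars.join [] ys := by
  induction xs with
  | nil => simp [PySem.Chars.join_nil]
  | cons p ps ih => simp [pvJoinNilCons, ih]

theorem pvEncALoop_eq (l : List Char) : ∀ (acc : List String) (last : Option Char),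
    PySem.Chars.join [] ((pvEncALoop l acc last).map String.toList) =
      PySem.Chars.join [] (acc.map String.toList) ++
        (if l.head? = some '\n' ∧ last = some '\r' then pvGEnc l.tail else pvGEnc l) := by
  induction l with
  | nil =>
    intro acc last
    simp [pvEncALoop, pvGEnc_nil]
  | cons c t ih =>
    intro acc last
    by_cases hr : c = '\r'
    · subst hr
      simp only [pvEncALoop, ih]
      cases t with
      | nil =>
        simp [pvGEnc_cr_nil, pvGEnc_nil, List.map_append, pvJoinNilCons,
          pvJoinNilAppend]
      | cons d t' =>
        by_cases hd : d = '\n'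
        · subst hd
          simp [pvGEnc_cr_lf, List.map_append, pvJoinNilAppend]
        · simp [pvGEnc_cr d t' hd, hd, List.map_append, pvJoinNilAppend]
    · by_cases hn : c = '\n'
      · subst hn
        simp only [pvEncALoop, ih]
        by_cases hl : last = some '\r'
        · simp [hl]
        · simp [hl, pvGEnc_lf, List.map_append, pvJoinNilAppend]
      · by_cases hq : c = '"'
        · subst hq
          simp only [pvEncALoop, ih]
          simp [pvGEnc_quote, List.map_append, pvJoinNilAppend]
        · by_cases hc : c = '^'
          · subst hc
            simp only [pvEncALoop, ih]
            simp [pvGEnc_caret, List.map_append, pvJoinNilAppend]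
          · simp only [pvEncALoop, ih]
            simp [pvGEnc_other c t hr hn hq hc, hr, hn, hq, hc, List.map_append,
              pvJoinNilAppend, Char.toString]

-- on a string with none of the four special characters, the encoding is the identity
theorem pvGEnc_no_special (l : List Char)
    (h : ∀ c ∈ l, c ≠ '\r' ∧ c ≠ '\n' ∧ c ≠ '"' ∧ c ≠ '^') :
    pvGEnc l = l := by
  induction l with
  | nil => exact pvGEnc_nil
  | cons c t ih =>
    obtain ⟨h1, h2, h3, h4⟩ := h c (List.mem_cons_self)
    rw [pvGEnc_other c t h1 h2 h3 h4, ih (fun c hc => h c (List.mem_cons_of_mem _ hc))]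

-- B's port computes pvGEnc on the character list
theorem pvAlt_toList (value : String) :
    (encodeParameterValue_alt value).toList = pvGEnc value.toList := by
  unfold encodeParameterValue_alt
  simp only [PySem.Str.toList_replace]
  rw [pvReplace_eq _ _ _ (by decide), pvReplace_eq _ _ _ (by decide),
      pvReplace_eq _ _ _ (by decide), pvReplace_eq _ _ _ (by decide),
      pvReplace_eq _ _ _ (by decide)]
  exact pvChain_eq_gEnc value.toList

-- ===== VERDICT (by name: the statement is the Claim_ definition above) =====
theorem encodeParameterValue_spec : Claim_equal_encodeParameterValue := by
  intro value _
  unfold Spec_encodeParameterValue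
  refine String.toList_inj.mp ?_
  rw [pvAlt_toList]
  unfold encodeParameterValue
  by_cases hE : (['\r', '\n', '"', '^'].foldl
      (fun e c => if value.toList.contains c then true else e) false) = true
  · rw [if_pos hE]
    simp only [PySem.Str.toList_join]
    rw [show ("" : String).toList = ([] : List Char) from rfl, pvEncALoop_eq]
    simp [PySem.Chars.join_nil]
  · rw [if_neg hE]
    simp only [List.foldl] at hE
    split_ifs at hE with a1 a2 a3 a4 <;> try exact absurd rfl hE
    have hnc : ∀ c ∈ value.toList, c ≠ '\r' ∧ c ≠ '\n' ∧ c ≠ '"' ∧ c ≠ '^' := by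
      intro c hc
      refine ⟨?_, ?_, ?_, ?_⟩ <;> rintro rfl <;> simp_all [List.contains_eq_mem]
    rw [pvGEnc_no_special value.toList hnc]
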